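-- pv_equiv track=rewrite | github.com/nandkishorrathodk-art/Ironcliw-ai | backend/core/file_integrity_guardian.py | _has_indentation_break
-- ===== SOURCE A (Python) =====
-- from typing import (
--     Any, Callable, Dict, List, Optional, Set, Tuple, Union
-- )
--
-- def _has_indentation_break(lines: List[str]) -> bool:
--     """Check if file has suspicious indentation breaks."""
--     if len(lines) < 10:
--         return False
--
--     # Check last 10 lines for sudden indentation changes
--     last_lines = lines[-10:]
--     prev_indent = None
--
--     for line in last_lines:
--         if not line.strip():
--             continue
--
--         current_indent = len(line) - len(line.lstrip())
--
--         if prev_indent is not None: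
--             # Sudden decrease by more than 8 spaces is suspicious
--             if prev_indent - current_indent > 8:
--                 return True
--
--         prev_indent = current_indent
--
--     return False
-- ===== SOURCE B (Python) =====
-- from typing import List, Optional, Tuple
--
-- def _scan(ls: List[str]) -> Tuple[Optional[int], bool]:
--     """Recursively scan: return (first non-blank indent or None,
--     whether a break >8 occurs between consecutive non-blank indents)."""
--     if not ls:
--         return None, False
--     head, rest = ls[0], ls[1:]
--     if not head.strip():
--         return _scan(rest)
--     ind = len(head) - len(head.lstrip())
--     nxt, brk = _scan(rest)
--     return ind, brk or (nxt is not None and ind - nxt > 8)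
--
-- def _has_indentation_break(lines: List[str]) -> bool:
--     if len(lines) < 10:
--         return False
--     return _scan(lines[-10:])[1]
-- ===== Notes on version B (the rewrite author's own statement) =====
-- stated objective: alternative
-- what changed: Replaces A's iterative left-to-right state machine carrying prev_indent with a compositional structural recursion that recurses to the end of the list first and, on the way back, combines each sublist's result as a pair (first non-blank indent, break flag).
import Mathlib
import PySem

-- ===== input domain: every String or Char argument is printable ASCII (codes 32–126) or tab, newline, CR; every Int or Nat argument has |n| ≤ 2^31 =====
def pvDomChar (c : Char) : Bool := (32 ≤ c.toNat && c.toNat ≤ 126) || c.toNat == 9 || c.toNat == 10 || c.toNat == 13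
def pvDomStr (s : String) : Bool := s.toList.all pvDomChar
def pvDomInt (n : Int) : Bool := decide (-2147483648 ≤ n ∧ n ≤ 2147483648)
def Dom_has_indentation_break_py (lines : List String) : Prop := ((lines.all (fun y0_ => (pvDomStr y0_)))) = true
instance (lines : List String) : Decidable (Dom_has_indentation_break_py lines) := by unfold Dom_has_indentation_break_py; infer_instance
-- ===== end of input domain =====

-- B replaces A's iterative prev_indent state machine with a compositional structural
-- recursion returning (first non-blank indent, break flag) for each suffix; same cost.

-- ===== PORT A =====
-- A's loop over last_lines carrying prev_indent (None → Option).
def pvALoop : List String → Option Int → Bool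
  | [], _ => false
  | l :: rest, prev =>
    if PySem.Str.strip l == "" then pvALoop rest prev
    else
      let cur : Int := PySem.Str.len l - PySem.Str.len (PySem.Str.lstrip l)
      match prev with
      | some p => if p - cur > 8 then true else pvALoop rest (some cur)
      | none => pvALoop rest (some cur)

def has_indentation_break_py (lines : List String) : Bool :=
  if PySem.List.len lines < 10 then false
  else
    let last_lines := PySem.List.slice lines (some (-10)) none
    pvALoop last_lines none

-- ===== PORT B =====
-- B's recursive _scan: (first non-blank indent or none, break flag).
def pvScan : List String → Option Int × Bool
  | [] => (none, false)
  | head :: rest =>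
    if PySem.Str.strip head == "" then pvScan rest
    else
      let ind : Int := PySem.Str.len head - PySem.Str.len (PySem.Str.lstrip head)
      let r := pvScan rest
      (some ind,
       r.2 || (match r.1 with
               | some n => decide (ind - n > 8)
               | none => false))

def has_indentation_break_py_alt (lines : List String) : Bool :=
  if PySem.List.len lines < 10 then false
  else (pvScan (PySem.List.slice lines (some (-10)) none)).2

-- ===== PRECONDITION & SPEC =====
def Spec_has_indentation_break_py (lines : List String) (out : Bool) : Prop := out = has_indentation_break_py_alt lines
instance (lines : List String) (out : Bool) : Decidable (Spec_has_indentation_break_py lines out) := by unfold Spec_has_indentation_break_py; infer_instance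

-- ===== CLAIM =====
def Claim_equal_has_indentation_break_py : Prop := ∀ (lines : List String), Dom_has_indentation_break_py lines → Spec_has_indentation_break_py lines (has_indentation_break_py lines)

-- ===== LEMMAS AND PROOFS =====

-- The non-blank indents of a list of lines (proof device relating the two ports).
def pvIndents (ls : List String) : List Int :=
  (ls.filter (fun l => !(PySem.Str.strip l == ""))).map
    (fun l => PySem.Str.len l - PySem.Str.len (PySem.Str.lstrip l))

-- Whether some consecutive pair of xs drops by more than 8.
def pvPairAny : List Int → Bool
  | i :: j :: xs => decide (i - j > 8) || pvPairAny (j :: xs)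
  | _ => false

lemma pvIndents_cons_blank (l : String) (rest : List String)
    (h : (PySem.Str.strip l == "") = true) :
    pvIndents (l :: rest) = pvIndents rest := by
  simp [pvIndents, List.filter_cons, h]

lemma pvIndents_cons_nonblank (l : String) (rest : List String)
    (h : ¬ (PySem.Str.strip l == "") = true) :
    pvIndents (l :: rest) =
      (PySem.Str.len l - PySem.Str.len (PySem.Str.lstrip l)) :: pvIndents rest := by
  simp [pvIndents, List.filter_cons, h]

lemma pvPairAny_cons (i : Int) (xs : List Int) :
    pvPairAny (i :: xs) =
      (pvPairAny xs || (match xs.head? with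
                        | some n => decide (i - n > 8)
                        | none => false)) := by
  cases xs with
  | nil => simp [pvPairAny]
  | cons j ys => simp [pvPairAny, Bool.or_comm]

-- A's loop computes pvPairAny over prev (if any) followed by the non-blank indents.
lemma pvALoop_eq (ls : List String) (prev : Option Int) :
    pvALoop ls prev = pvPairAny (prev.toList ++ pvIndents ls) := by
  induction ls generalizing prev with
  | nil => cases prev <;> simp [pvALoop, pvIndents, pvPairAny]
  | cons l rest ih =>
    by_cases h : (PySem.Str.strip l == "") = true
    · rw [pvIndents_cons_blank l rest h]
      simp only [pvALoop, if_pos h]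
      exact ih prev
    · rw [pvIndents_cons_nonblank l rest h]
      cases prev with
      | none =>
        simp only [pvALoop, if_neg h]
        exact ih (some _)
      | some p =>
        simp only [pvALoop, if_neg h, Option.toList, List.cons_append, List.nil_append]
        show _ = pvPairAny (p :: _ :: _)
        rw [pvPairAny]
        by_cases hc : (8:Int) < p - (PySem.Str.len l - PySem.Str.len (PySem.Str.lstrip l))
        · rw [if_pos hc, decide_eq_true hc, Bool.true_or]
        · rw [if_neg hc, decide_eq_false hc, Bool.false_or]
          exact ih (some _)

-- B's recursion computes (head of the non-blank indents, pvPairAny of them).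
lemma pvScan_eq (ls : List String) :
    pvScan ls = ((pvIndents ls).head?, pvPairAny (pvIndents ls)) := by
  induction ls with
  | nil => simp [pvScan, pvIndents, pvPairAny]
  | cons l rest ih =>
    by_cases h : (PySem.Str.strip l == "") = true
    · rw [pvIndents_cons_blank l rest h]
      simp only [pvScan, if_pos h]
      exact ih
    · rw [pvIndents_cons_nonblank l rest h]
      simp only [pvScan, if_neg h, ih, List.head?_cons]
      rw [pvPairAny_cons]

-- ===== VERDICT =====
theorem has_indentation_break_py_spec : Claim_equal_has_indentation_break_py := by
  intro lines _
  show has_indentation_break_py lines = has_indentation_break_py_alt lines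
  unfold has_indentation_break_py has_indentation_break_py_alt
  split
  · rfl
  · rw [pvALoop_eq, pvScan_eq]; rfl
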